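-- pv_equiv track=rewrite | github.com/nursimadonuk/csci127-assignments | final_2/scabble.py | withWild
-- ===== SOURCE A (Python) =====
-- def withWild(letters, word):
--     d = {}
--     for letter in letters:
--         if letter not in d.keys():
--             d[letter] = 1
--         else:
--             d[letter] = d[letter] + 1
--
--     count = 0
--     for letter in word:
--         if letter in d.keys() and d[letter] > 0:
--             count += 1
--             d[letter] = d[letter] - 1
--         else:
--             count = count
--     if count == len(word):
--         return True
--     elif count != len(word):
--         if (len(word) - count) <= d['?']:
--             return True
--         else:
--             return False
-- ===== SOURCE B (Python) =====
-- def withWild(letters, word):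
--     # occurrence-rank test: the k-th occurrence of a char is matchable iff k <= letters.count(c)
--     unmatched = sum(1 for i, c in enumerate(word)
--                     if word[:i + 1].count(c) > letters.count(c))
--     if unmatched == 0:
--         return True
--     spare = letters.count('?') - min(word.count('?'), letters.count('?'))
--     return unmatched <= spare
-- ===== Notes on version B (the rewrite author's own statement) =====
-- stated objective: alternative
-- what changed: A builds a mutable count-dict from letters and greedily consumes it per word letter; B keeps no dict and no mutable state: it counts, via a comprehension over enumerate(word), the occurrences whose rank within the word exceeds letters.count(c), then compares that deficit with the leftover wildcards computed directly from '?' counts.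
import Mathlib
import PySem

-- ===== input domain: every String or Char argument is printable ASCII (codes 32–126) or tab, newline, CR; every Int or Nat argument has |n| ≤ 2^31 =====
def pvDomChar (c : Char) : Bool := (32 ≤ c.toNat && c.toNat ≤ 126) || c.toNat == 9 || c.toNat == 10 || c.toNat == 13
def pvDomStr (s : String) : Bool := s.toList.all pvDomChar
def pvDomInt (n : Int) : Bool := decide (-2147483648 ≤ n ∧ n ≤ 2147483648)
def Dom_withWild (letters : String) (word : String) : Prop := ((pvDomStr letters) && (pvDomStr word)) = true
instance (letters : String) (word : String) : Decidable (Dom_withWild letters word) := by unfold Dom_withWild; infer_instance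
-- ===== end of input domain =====

-- B replaces A's mutable count-dict consumption by a per-occurrence rank test (the k-th occurrence of a
-- char is matchable iff k ≤ letters.count(c)); equivalence is about the return value only.

-- ===== PORT A =====
-- build loop: d[letter] = 1 if fresh else d[letter] + 1
def wwBuild (d : PySem.Dict Char Int) (letter : Char) : PySem.Dict Char Int :=
  if ¬ d.contains letter then d.insert letter 1
  else d.insert letter (d.getD letter 0 + 1)

-- consume loop body: if letter in d and d[letter] > 0: count += 1; d[letter] -= 1
def wwStepA (s : Int × PySem.Dict Char Int) (letter : Char) : Int × PySem.Dict Char Int :=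
  if s.2.contains letter && decide (0 < s.2.getD letter 0)
  then (s.1 + 1, s.2.insert letter (s.2.getD letter 0 - 1))
  else s

def withWild (letters : String) (word : String) : Bool :=
  let d := letters.toList.foldl wwBuild PySem.Dict.empty
  let s := word.toList.foldl wwStepA (0, d)
  if s.1 = (word.toList.length : Int) then true
  else
    match s.2.get? '?' with      -- d['?']: none = KeyError, excluded by Pre_
    | some v => decide ((word.toList.length : Int) - s.1 ≤ v)
    | none => false

-- ===== PORT B =====
-- genexp body: 1 if word[:i+1].count(c) > letters.count(c) else skip
def wwStepB (ws : List Char) (ls : List Char) (acc : Int) (p : Int × Char) : Int :=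
  if PySem.List.count ls p.2 < PySem.List.count (PySem.List.slice ws none (some (p.1 + 1))) p.2
  then acc + 1 else acc

def withWild_alt (letters : String) (word : String) : Bool :=
  let ws := word.toList
  let ls := letters.toList
  let unmatched : Int := (PySem.List.enumerate ws 0).foldl (wwStepB ws ls) 0
  if unmatched = 0 then true
  else
    let spare : Int := (PySem.List.count ls '?' : Int) -
      min (PySem.List.count ws '?' : Int) (PySem.List.count ls '?' : Int)
    decide (unmatched ≤ spare)

-- ===== PRECONDITION & SPEC =====
-- Pre_ excludes exactly the inputs on which A raises KeyError on d['?'] (some letter of word is in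
-- deficit and letters contains no '?'); B returns False there.
def Pre_withWild (letters : String) (word : String) : Prop :=
  '?' ∈ letters.toList ∨ ∀ c ∈ word.toList, word.toList.count c ≤ letters.toList.count c
instance (letters : String) (word : String) : Decidable (Pre_withWild letters word) := by
  unfold Pre_withWild; infer_instance

def pvWitness_withWild : String × String := ("ab?", "ba")

def Spec_withWild (letters : String) (word : String) (out : Bool) : Prop := out = withWild_alt letters word
instance (letters : String) (word : String) (out : Bool) : Decidable (Spec_withWild letters word out) := by unfold Spec_withWild; infer_instance

-- ===== CLAIM (what is proved, stated in full; the proofs are below) =====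
def Claim_equal_withWild : Prop := ∀ (letters : String) (word : String), Dom_withWild letters word → Pre_withWild letters word → Spec_withWild letters word (withWild letters word)

-- ===== LEMMAS AND PROOFS =====

lemma wwBuild_eq_counter (ls : List Char) :
    ls.foldl wwBuild PySem.Dict.empty = PySem.Dict.counter ls := by
  rw [show wwBuild = (fun d x => d.insert x (d.getD x 0 + 1)) from ?_]
  · exact PySem.Dict.foldl_insert_getD_add_one_eq_counter ls
  · funext d x
    unfold wwBuild
    split_ifs with h
    · rfl
    · have h0 : d.getD x 0 = 0 := by simp [pysem, h]
      rw [h0]; norm_num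

lemma get?_d0 (ls : List Char) (c : Char) :
    (ls.foldl wwBuild PySem.Dict.empty).get? c =
      if c ∈ ls then some ((ls.count c : Int)) else none := by
  rw [wwBuild_eq_counter]
  cases hc : (PySem.Dict.counter ls).get? c with
  | none =>
    have : (PySem.Dict.counter ls).contains c = false := by
      rw [PySem.Dict.contains_eq_isSome_get?, hc]; rfl
    have hmem : c ∉ ls := by
      simpa [PySem.Dict.contains_counter] using this
    simp [hmem]
  | some v =>
    have hcon : (PySem.Dict.counter ls).contains c = true := by
      rw [PySem.Dict.contains_eq_isSome_get?, hc]; rfl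
    have hmem : c ∈ ls := by simpa [PySem.Dict.contains_counter] using hcon
    have : (PySem.Dict.counter ls).getD c 0 = (ls.count c : Int) := PySem.Dict.getD_counter ls c
    rw [PySem.Dict.getD_eq_get?_getD, hc] at this
    simp [hmem, ← this]

lemma loop_inv (ls w : List Char) :
    (w.foldl wwStepA (0, ls.foldl wwBuild PySem.Dict.empty)).1 =
      (w.length : Int) - (PySem.List.enumerate w 0).foldl (wwStepB w ls) 0
    ∧ ∀ c : Char, (w.foldl wwStepA (0, ls.foldl wwBuild PySem.Dict.empty)).2.get? c =
        if c ∈ ls then some ((ls.count c : Int) - min (w.count c : Int) (ls.count c : Int)) else none := by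
  induction w using List.reverseRecOn with
  | nil =>
    refine ⟨by simp [PySem.List.enumerate], ?_⟩
    intro c
    simp only [List.foldl_nil]
    rw [get?_d0]
    split_ifs with h
    · have : (0:Int) ≤ (ls.count c : Int) := by positivity
      simp
    · rfl
  | append_singleton w a IH =>
    obtain ⟨h1, h2⟩ := IH
    set r := w.foldl wwStepA (0, ls.foldl wwBuild PySem.Dict.empty) with hr
    -- B's fold over the longer word, restricted to the old indices, is the old fold
    have hcongr : (PySem.List.enumerate w 0).foldl (wwStepB (w ++ [a]) ls) 0
        = (PySem.List.enumerate w 0).foldl (wwStepB w ls) 0 := by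
      apply PySem.List.foldl_congr_mem
      intro acc p hp
      rw [PySem.List.mem_enumerate_iff] at hp
      obtain ⟨k, hk, rfl⟩ := hp
      simp only [wwStepB]
      have hc : (0 + (k:Int), w[k]).1 + 1 = ((k+1 : Nat) : Int) := by push_cast; ring
      rw [hc, PySem.List.slice_to_natCast, PySem.List.slice_to_natCast,
        List.take_append_of_le_length (by omega)]
    have hU : (PySem.List.enumerate (w ++ [a]) 0).foldl (wwStepB (w ++ [a]) ls) 0
        = wwStepB (w ++ [a]) ls ((PySem.List.enumerate w 0).foldl (wwStepB w ls) 0) ((w.length : Int), a) := by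
      rw [PySem.List.enumerate_append, List.foldl_append, hcongr]
      simp [PySem.List.enumerate]
    -- the last B step: slice is the whole w ++ [a]
    have hslice : PySem.List.slice (w ++ [a]) none (some ((w.length : Int) + 1)) = w ++ [a] := by
      have : ((w.length : Int) + 1) = ((w.length + 1 : Nat) : Int) := by push_cast; ring
      rw [this, PySem.List.slice_to_natCast]
      exact List.take_of_length_le (by simp)
    have hcnt : PySem.List.count (w ++ [a]) a = w.count a + 1 := by
      simp [PySem.List.count_eq]
    have hlast : wwStepB (w ++ [a]) ls ((PySem.List.enumerate w 0).foldl (wwStepB w ls) 0) ((w.length : Int), a)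
        = if ls.count a ≤ w.count a
          then (PySem.List.enumerate w 0).foldl (wwStepB w ls) 0 + 1
          else (PySem.List.enumerate w 0).foldl (wwStepB w ls) 0 := by
      simp only [wwStepB, hslice, hcnt, PySem.List.count_eq]
      split_ifs with h1' h2' h2' <;> omega
    rw [List.foldl_append, List.foldl_cons, List.foldl_nil, hU, hlast]
    -- now case analysis on A's step
    clear_value r
    rw [← hr]
    by_cases hmem : a ∈ ls
    · have hget : r.2.get? a = some ((ls.count a : Int) - min (w.count a : Int) (ls.count a : Int)) := by
        rw [h2]; simp [hmem]
      have hcon : r.2.contains a = true := by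
        rw [PySem.Dict.contains_eq_isSome_get?, hget]; rfl
      have hgetD : r.2.getD a 0 = (ls.count a : Int) - min (w.count a : Int) (ls.count a : Int) := by
        rw [PySem.Dict.getD_eq_get?_getD, hget]; rfl
      by_cases hlt : w.count a < ls.count a
      · -- A takes the letter, B does not count it unmatched
        have hcond : (r.2.contains a && decide (0 < r.2.getD a 0)) = true := by
          rw [hcon, hgetD]; simp; omega
        have hstep : wwStepA r a = (r.1 + 1, r.2.insert a (r.2.getD a 0 - 1)) := by
          unfold wwStepA; rw [hcond]; simp
        rw [hstep]
        constructor
        · simp only [List.length_append, List.length_cons, List.length_nil]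
          rw [if_neg (by omega)]
          push_cast
          omega
        · intro c
          rw [PySem.Dict.get?_insert, hgetD]
          by_cases hca : c = a
          · subst hca
            rw [if_pos rfl, if_pos hmem]
            have : (w ++ [c]).count c = w.count c + 1 := by
              simp [List.count_append]
            rw [this]
            congr 1
            push_cast
            omega
          · rw [if_neg hca, h2]
            have : (w ++ [a]).count c = w.count c := by simp [List.count_append, Ne.symm hca]
            rw [this]
      · -- A's remaining count is 0: skip; B counts it unmatched
        have hcond : (r.2.contains a && decide (0 < r.2.getD a 0)) = false := by
          rw [hcon, hgetD]; simp; omega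
        have hstep : wwStepA r a = r := by
          unfold wwStepA; rw [hcond]; simp
        rw [hstep]
        constructor
        · rw [if_pos (by omega)]
          simp only [List.length_append, List.length_cons, List.length_nil]
          push_cast
          omega
        · intro c
          rw [h2]
          by_cases hca : c = a
          · subst hca
            rw [if_pos hmem, if_pos hmem]
            have : (w ++ [c]).count c = w.count c + 1 := by
              simp [List.count_append]
            rw [this]
            congr 1
            push_cast
            omega
          · have : (w ++ [a]).count c = w.count c := by simp [List.count_append, Ne.symm hca]
            rw [this]
    · -- a not among the letters: A skips, B counts unmatched
      have hget : r.2.get? a = none := by rw [h2]; simp [hmem]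
      have hcon : r.2.contains a = false := by
        rw [PySem.Dict.contains_eq_isSome_get?, hget]; rfl
      have hcond : (r.2.contains a && decide (0 < r.2.getD a 0)) = false := by
        rw [hcon]; simp
      have hcnt0 : ls.count a = 0 := by simp [List.count_eq_zero, hmem]
      have hstep : wwStepA r a = r := by
        unfold wwStepA; rw [hcond]; simp
      rw [hstep]
      constructor
      · rw [if_pos (by omega)]
        simp only [List.length_append, List.length_cons, List.length_nil]
        push_cast
        omega
      · intro c
        rw [h2]
        by_cases hca : c = a
        · subst hca
          rw [if_neg hmem, if_neg hmem]
        · have : (w ++ [a]).count c = w.count c := by simp [List.count_append, Ne.symm hca]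
          rw [this]

lemma U_eq_zero_of_allok (ws ls : List Char)
    (h : ∀ c ∈ ws, ws.count c ≤ ls.count c) :
    (PySem.List.enumerate ws 0).foldl (wwStepB ws ls) 0 = 0 := by
  rw [PySem.List.foldl_congr_mem (PySem.List.enumerate ws 0) (wwStepB ws ls) (fun acc _ => acc) 0 ?_]
  · induction PySem.List.enumerate ws 0 with
    | nil => rfl
    | cons x l IH => simp [IH]
  · intro acc p hp
    rw [PySem.List.mem_enumerate_iff] at hp
    obtain ⟨k, hk, rfl⟩ := hp
    unfold wwStepB
    rw [if_neg]
    simp only [PySem.List.count_eq]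
    have hc : (0 + (k:Int), ws[k]).1 + 1 = ((k+1 : Nat) : Int) := by push_cast; ring
    rw [hc, PySem.List.slice_to_natCast]
    have hsub : List.count ws[k] (List.take (k+1) ws) ≤ List.count ws[k] ws :=
      (List.take_sublist _ _).count_le _
    have := h ws[k] (List.getElem_mem hk)
    omega


-- ===== VERDICT (by name: the statement is the Claim_ definition above) =====
theorem withWild_spec : Claim_equal_withWild := by
  intro letters word _hdom hpre
  unfold Spec_withWild withWild withWild_alt
  obtain ⟨h1, h2⟩ := loop_inv letters.toList word.toList
  simp only []
  set r := word.toList.foldl wwStepA (0, letters.toList.foldl wwBuild PySem.Dict.empty) with hrr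
  set U := (PySem.List.enumerate word.toList 0).foldl (wwStepB word.toList letters.toList) 0 with hUU
  by_cases hU0 : U = 0
  · rw [if_pos (by omega), if_pos hU0]
  · rw [if_neg (by omega), if_neg hU0]
    have hq : '?' ∈ letters.toList := by
      rcases hpre with h | h
      · exact h
      · exact absurd (U_eq_zero_of_allok _ _ h) hU0
    rw [h2 '?', if_pos hq]
    simp only [PySem.List.count_eq]
    rw [decide_eq_decide]
    omega
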